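-- pv_equiv track=rewrite | github.com/KOPFYF/LCEveryday | Hash Table & Prefix Sum/splitArray548.py | splitArray
-- ===== SOURCE A (Python) =====
-- from typing import List
--
-- def splitArray(nums: List[int]) -> bool:
--     '''
--     0 ... i ... j ... k ... n-1
--
--     '''
--     n = len(nums)
--     sums = [0] * (n + 1)
--     for i in range(n):
--         sums[i + 1] = sums[i] + nums[i]
--     for j in range(3, n - 3):
--         s = set()
--         for i in range(1, j - 1):
--             if sums[i] == (sums[j] - sums[i+1]):
--                 s.add(sums[i])
--         for k in range(j + 2, n - 1):
--             sjk = sums[k] - sums[j+1]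
--             skn = sums[n] - sums[k+1]
--             if sjk == skn and sjk in s:
--                 return True
--     return False
-- ===== SOURCE B (Python) =====
-- from typing import List
--
-- def splitArray(nums: List[int]) -> bool:
--     n = len(nums)
--     sums = [0] * (n + 1)
--     for t in range(n):
--         sums[t + 1] = sums[t] + nums[t]
--     for i in range(1, n - 5):
--         p1 = sums[i]
--         for j in range(i + 2, n - 3):
--             if sums[j] - sums[i + 1] != p1:
--                 continue
--             for k in range(j + 2, n - 1):
--                 if sums[k] - sums[j + 1] == p1 and sums[n] - sums[k + 1] == p1:
--                     return True
--     return False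
-- ===== Notes on version B (the rewrite author's own statement) =====
-- stated objective: simpler
-- what changed: Replaced the per-j hash set of matching left sums with a plain triple nested loop over the divider indices i<j<k that compares the four part sums directly, dropping the set entirely.
import Mathlib
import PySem

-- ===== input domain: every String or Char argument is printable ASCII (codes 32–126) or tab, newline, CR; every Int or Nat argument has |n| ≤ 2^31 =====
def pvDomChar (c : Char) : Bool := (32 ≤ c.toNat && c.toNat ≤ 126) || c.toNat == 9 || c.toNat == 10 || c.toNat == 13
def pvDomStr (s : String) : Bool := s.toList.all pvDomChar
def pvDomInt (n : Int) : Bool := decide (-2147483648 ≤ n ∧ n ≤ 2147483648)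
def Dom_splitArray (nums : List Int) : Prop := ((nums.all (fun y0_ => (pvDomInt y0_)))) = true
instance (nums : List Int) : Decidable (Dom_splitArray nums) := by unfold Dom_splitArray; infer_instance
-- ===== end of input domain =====

-- B replaces A's per-j hash set of matching left sums by a plain triple loop over
-- the dividers i<j<k comparing the four part sums directly (simpler, no set).


-- ===== PORT A =====
-- sums = [0]*(n+1); for i in range(n): sums[i+1] = sums[i] + nums[i]
def pvSums (nums : List Int) : List Int :=
  (PySem.List.pyRange 0 (PySem.List.len nums) 1).foldl
    (fun sums i =>
      PySem.List.pySetD sums (i + 1)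
        (PySem.List.pyGetD sums i 0 + PySem.List.pyGetD nums i 0))
    (List.replicate ((PySem.List.len nums) + 1).toNat 0)

def splitArray (nums : List Int) : Bool :=
  let n : Int := PySem.List.len nums
  let sums : List Int := pvSums nums
  -- for j in range(3, n-3): build s; for k in range(j+2, n-1): early return True → any/any
  (PySem.List.pyRange 3 (n - 3) 1).any (fun j =>
    let s : PySem.Set Int :=
      (PySem.List.pyRange 1 (j - 1) 1).foldl
        (fun s i =>
          if PySem.List.pyGetD sums i 0 ==
             PySem.List.pyGetD sums j 0 - PySem.List.pyGetD sums (i + 1) 0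
          then PySem.Set.add s (PySem.List.pyGetD sums i 0) else s)
        PySem.Set.empty
    (PySem.List.pyRange (j + 2) (n - 1) 1).any (fun k =>
      let sjk := PySem.List.pyGetD sums k 0 - PySem.List.pyGetD sums (j + 1) 0
      let skn := PySem.List.pyGetD sums n 0 - PySem.List.pyGetD sums (k + 1) 0
      sjk == skn && PySem.Set.contains s sjk))

-- ===== PORT B =====
def splitArray_alt (nums : List Int) : Bool :=
  let n : Int := PySem.List.len nums
  let sums : List Int := pvSums nums
  -- triple loop over i < j < k with early return True → nested any; 'continue' → &&
  (PySem.List.pyRange 1 (n - 5) 1).any (fun i =>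
    let p1 := PySem.List.pyGetD sums i 0
    (PySem.List.pyRange (i + 2) (n - 3) 1).any (fun j =>
      (PySem.List.pyGetD sums j 0 - PySem.List.pyGetD sums (i + 1) 0 == p1) &&
      (PySem.List.pyRange (j + 2) (n - 1) 1).any (fun k =>
        (PySem.List.pyGetD sums k 0 - PySem.List.pyGetD sums (j + 1) 0 == p1) &&
        (PySem.List.pyGetD sums n 0 - PySem.List.pyGetD sums (k + 1) 0 == p1))))

-- ===== PRECONDITION & SPEC =====
def Spec_splitArray (nums : List Int) (out : Bool) : Prop := out = splitArray_alt nums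
instance (nums : List Int) (out : Bool) : Decidable (Spec_splitArray nums out) := by unfold Spec_splitArray; infer_instance

-- ===== CLAIM (what is proved, stated in full; the proofs are below) =====
def Claim_equal_splitArray : Prop := ∀ (nums : List Int), Dom_splitArray nums → Spec_splitArray nums (splitArray nums)

-- ===== LEMMAS AND PROOFS =====

-- membership in the set A builds by a conditional-add loop
theorem pv_mem_setfold (l : List Int) (c : Int → Prop) [DecidablePred c] (f : Int → Int) (x : Int) :
    x ∈ l.foldl (fun s i => if c i then PySem.Set.add s (f i) else s) PySem.Set.empty
      ↔ ∃ i ∈ l, c i ∧ x = f i := by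
  rw [PySem.List.foldl_ite_eq_foldl_filter, PySem.Set.mem_foldl_add]
  simp [List.mem_filter, PySem.Set.empty]
  tauto

theorem pv_eq (nums : List Int) : splitArray nums = splitArray_alt nums := by
  unfold splitArray splitArray_alt
  set n : Int := PySem.List.len nums with hn
  set S : List Int := pvSums nums with hS
  rw [Bool.eq_iff_iff]
  simp only [List.any_eq_true, PySem.List.mem_pyRange_one, Bool.and_eq_true, beq_iff_eq,
    PySem.Set.contains_iff, pv_mem_setfold]
  constructor
  · rintro ⟨j, ⟨hj3, hjn⟩, k, ⟨hk1, hk2⟩, hsk, i, ⟨hi1, hi2⟩, hc, hx⟩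
    refine ⟨i, ⟨hi1, by omega⟩, j, ⟨by omega, hjn⟩, by omega, k, ⟨hk1, hk2⟩, by omega, by omega⟩
  · rintro ⟨i, ⟨hi1, hi2⟩, j, ⟨hj1, hj2⟩, hc, k, ⟨hk1, hk2⟩, h3, h4⟩
    refine ⟨j, ⟨by omega, hj2⟩, k, ⟨hk1, hk2⟩, by omega, i, ⟨hi1, by omega⟩, by omega, by omega⟩

-- ===== VERDICT (by name: the statement is the Claim_ definition above) =====
theorem splitArray_spec : Claim_equal_splitArray := by
  intro nums _
  unfold Spec_splitArray
  exact pv_eq nums
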